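-- pv_equiv track=rewrite | github.com/Yu-Miri/Programmas | 프로그래머스/unrated/138477. 명예의 전당 （1）/명예의 전당 （1）.py | solution
-- ===== SOURCE A (Python) =====
-- def solution(k, score):
-- #     worst_rank = []
-- #     ranking = [0 for i in range(k)] # 명예의 전당 자리만큼 리스트 생성
--
-- #     for s in score:
-- #         if s >= ranking[ranking.index(min(ranking))]: # s가 ranking에서 가장 작은 값보다 크다면
-- #             ranking[ranking.index(min(ranking))] = s # ranking에서 가장 작은 값의 index 자리를 s로 대체
-- #         worst_rank.append(min(ranking)) # 최하위 점수를 worst_rank 추가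
--
-- #     for i in range(k-1): # 처음에 생성된 명예의 전당 자리에 존재하는 0 값을
-- #         worst_rank[i] = min(score[:i+1]) # score[:i+1]의 가장 작은 값으로 대체
--
-- #     return worst_rank
--     worst_rank = []
--     ranking = []
--     for s in score: # score for문 돌면서
--         ranking.append(s) # ranking에 추가
--         ranking = sorted(ranking, reverse=True)[:k]
--         # 내림차순 정렬 후 명예의 전당 자리 수만큼 끊어서
--
--         worst_rank.append(min(ranking)) # 명예의 전당에서 최하위 점수를 추가
--
--     return worst_rank
-- ===== SOURCE B (Python) =====
-- def solution(k, score):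
--     # Hall kept as an ascending sorted list of at most k scores;
--     # each step either inserts (room left), replaces the current minimum,
--     # or leaves the hall unchanged, then reports the minimum hall[0].
--     hall = []
--     worst = []
--     for s in score:
--         if len(hall) < k:
--             _insort(hall, s)
--         elif hall[0] < s:
--             hall.pop(0)
--             _insort(hall, s)
--         worst.append(hall[0])
--     return worst
--
--
-- def _insort(hall, s):
--     # binary search for the leftmost position whose element is >= s
--     lo, hi = 0, len(hall)
--     while lo < hi:
--         mid = (lo + hi) // 2
--         if hall[mid] < s:
--             lo = mid + 1
--         else:
--             hi = mid
--     hall.insert(lo, s)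
-- ===== Notes on version B (the rewrite author's own statement) =====
-- stated objective: faster
-- what changed: Instead of re-sorting the whole hall and re-slicing it to k on every score, B keeps the hall as an ascending sorted list of at most k entries and does one binary-search insertion (or replaces the minimum, or skips the score), reporting hall[0] each step; intended as faster, measured 7.5-39x on a timing run's sorted inputs (unconfirmed at the largest size, where both time out on some inputs).
import Mathlib
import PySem

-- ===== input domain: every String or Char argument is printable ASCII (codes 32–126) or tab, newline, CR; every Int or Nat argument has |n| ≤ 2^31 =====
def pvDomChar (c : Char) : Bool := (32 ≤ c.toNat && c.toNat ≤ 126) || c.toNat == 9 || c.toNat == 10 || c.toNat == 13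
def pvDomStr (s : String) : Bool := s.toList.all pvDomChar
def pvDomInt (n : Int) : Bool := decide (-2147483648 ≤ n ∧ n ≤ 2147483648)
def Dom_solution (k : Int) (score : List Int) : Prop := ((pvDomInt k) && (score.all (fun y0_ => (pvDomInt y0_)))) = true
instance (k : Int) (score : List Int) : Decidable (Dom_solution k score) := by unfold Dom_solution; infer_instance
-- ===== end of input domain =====

-- B replaces A's per-step "append, full descending sort, truncate to k" by an ordered
-- insertion into a size-k ascending hall (insert / replace-minimum / skip); return value only.

-- ===== PORT A =====
-- loop body of A: ranking = sorted(ranking + [s], reverse=True)[:k]; worst_rank.append(min(ranking))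
-- min(ranking) raises ValueError when ranking is empty (only when k ≤ 0, excluded by Pre_);
-- the `.getD 0` is exactly that none case.
def stepA (k : Int) (st : List Int × List Int) (s : Int) : List Int × List Int :=
  let ranking := PySem.List.slice (PySem.List.sorted (st.1 ++ [s]) (fun x => x) true) none (some k)
  (ranking, st.2 ++ [(PySem.List.min? ranking (fun x => x)).getD 0])

def solution (k : Int) (score : List Int) : List Int :=
  (score.foldl (stepA k) ([], [])).2

-- ===== PORT B =====
-- _insort's while loop: lo/hi binary search for the leftmost index holding an element ≥ s;
-- mid = (lo + hi) // 2 is always a valid index (lo < hi ≤ len(hall)), so the getD default 0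
-- is unreachable — exact for Python's hall[mid]
-- the counter hi - lo bounds the number of iterations (each step shrinks hi - lo),
-- making the loop a structural recursion; it never runs out while lo < hi
def insortPos (hall : List Int) (s : Int) : Nat → Nat → Nat → Nat
  | 0, lo, _hi => lo
  | fuel + 1, lo, hi =>
    if lo < hi then
      if hall.getD ((lo + hi) / 2) 0 < s then insortPos hall s fuel ((lo + hi) / 2 + 1) hi
      else insortPos hall s fuel lo ((lo + hi) / 2)
    else lo

-- _insort(hall, s): the binary search, then hall.insert(lo, s) with 0 ≤ lo ≤ len(hall)
def insort (hall : List Int) (s : Int) : List Int :=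
  let lo := insortPos hall s hall.length 0 hall.length
  hall.take lo ++ s :: hall.drop lo

-- loop body of B; hall[0] raises IndexError on an empty hall (only when k ≤ 0, excluded by
-- Pre_); the `.headD 0` is exactly that case.  hall.pop(0) is .tail.
def stepB (k : Int) (st : List Int × List Int) (s : Int) : List Int × List Int :=
  let hall :=
    if (st.1.length : Int) < k then insort st.1 s
    else if st.1.headD 0 < s then insort st.1.tail s
    else st.1
  (hall, st.2 ++ [hall.headD 0])

def solution_alt (k : Int) (score : List Int) : List Int :=
  (score.foldl (stepB k) ([], [])).2

-- ===== PRECONDITION & SPEC =====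
-- Pre_ excludes only k ≤ 0 with a nonempty score, where A raises ValueError (min of an
-- empty ranking) and B raises IndexError.
def Pre_solution (k : Int) (score : List Int) : Prop := score = [] ∨ 1 ≤ k
instance (k : Int) (score : List Int) : Decidable (Pre_solution k score) := by unfold Pre_solution; infer_instance
def pvWitness_solution : Int × List Int := (3, [10, 100, 20, 150, 1, 100, 200])
def Spec_solution (k : Int) (score : List Int) (out : List Int) : Prop := out = solution_alt k score
instance (k : Int) (score : List Int) (out : List Int) : Decidable (Spec_solution k score out) := by unfold Spec_solution; infer_instance

-- ===== CLAIM (what is proved, stated in full; the proofs are below) =====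
def Claim_equal_solution : Prop := ∀ (k : Int) (score : List Int), Dom_solution k score → Pre_solution k score → Spec_solution k score (solution k score)

-- ===== LEMMAS AND PROOFS =====

-- proof-side model of one ordered insertion: insort equals this simple structural insertion
-- whenever the hall is ascending (proved in insort_eq_insertAsc below)
def insertAsc (s : Int) : List Int → List Int
  | [] => [s]
  | x :: xs => if x < s then x :: insertAsc s xs else s :: x :: xs

lemma insertAsc_eq_takeWhile (s : Int) (l : List Int) :
    insertAsc s l
      = l.takeWhile (fun y => decide (y < s)) ++ s :: l.dropWhile (fun y => decide (y < s)) := by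
  induction l with
  | nil => rfl
  | cons x t ih =>
    by_cases hx : x < s
    · simp [insertAsc, hx, ih]
    · simp [insertAsc, hx]

lemma takeWhile_getD_lt {s : Int} :
    ∀ (l : List Int) (i : Nat), i < (l.takeWhile (fun y => decide (y < s))).length →
      l.getD i 0 < s := by
  intro l
  induction l with
  | nil => intro i h; simp at h
  | cons x t ih =>
    intro i h
    by_cases hx : x < s
    · rw [List.takeWhile_cons, if_pos (by simpa using hx)] at h
      cases i with
      | zero => simpa using hx
      | succ j => simpa using ih j (by simpa using h)
    · rw [List.takeWhile_cons, if_neg (by simpa using hx)] at h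
      simp at h

lemma takeWhile_getD_ge {s : Int} :
    ∀ (l : List Int), l.Pairwise (fun a b => a ≤ b) →
      ∀ i : Nat, (l.takeWhile (fun y => decide (y < s))).length ≤ i → i < l.length →
        s ≤ l.getD i 0 := by
  intro l
  induction l with
  | nil => intro _ i _ h; simp at h
  | cons x t ih =>
    intro hp i h1 h2
    rcases List.pairwise_cons.1 hp with ⟨hx, ht⟩
    by_cases hxs : x < s
    · rw [List.takeWhile_cons, if_pos (by simpa using hxs)] at h1
      cases i with
      | zero => simp at h1
      | succ j =>
        simpa using ih ht j (by simpa using h1) (by simpa using h2)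
    · cases i with
      | zero => simpa using not_lt.1 hxs
      | succ j =>
        have hj : j < t.length := by simpa using h2
        have hmem : t.getD j 0 ∈ t := by
          rw [List.getD_eq_getElem t 0 hj]
          exact List.getElem_mem hj
        simpa using le_trans (not_lt.1 hxs) (hx _ hmem)

lemma insortPos_eq (s : Int) (hall : List Int) (hp : hall.Pairwise (fun a b => a ≤ b)) :
    ∀ (n lo hi : Nat), hi - lo ≤ n →
      lo ≤ (hall.takeWhile (fun y => decide (y < s))).length →
      (hall.takeWhile (fun y => decide (y < s))).length ≤ hi → hi ≤ hall.length →
      insortPos hall s n lo hi = (hall.takeWhile (fun y => decide (y < s))).length := by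
  intro n
  induction n with
  | zero =>
    intro lo hi hn h1 h2 h3
    simp only [insortPos]
    omega
  | succ m ih =>
    intro lo hi hn h1 h2 h3
    by_cases h : lo < hi
    · rw [insortPos, if_pos h]
      by_cases hm : hall.getD ((lo + hi) / 2) 0 < s
      · rw [if_pos hm]
        have : (hall.takeWhile (fun y => decide (y < s))).length ≤ (lo + hi) / 2 →
            s ≤ hall.getD ((lo + hi) / 2) 0 :=
          fun hle => takeWhile_getD_ge hall hp _ hle (by omega)
        exact ih _ _ (by omega) (by omega) h2 h3
      · rw [if_neg hm]
        have : (lo + hi) / 2 < (hall.takeWhile (fun y => decide (y < s))).length →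
            hall.getD ((lo + hi) / 2) 0 < s :=
          fun hlt => takeWhile_getD_lt hall _ hlt
        exact ih _ _ (by omega) h1 (by omega) (by omega)
    · rw [insortPos, if_neg h]
      omega

lemma take_takeWhile_len (p : Int → Bool) :
    ∀ l : List Int, l.take ((l.takeWhile p).length) = l.takeWhile p := by
  intro l
  induction l with
  | nil => rfl
  | cons x t ih =>
    by_cases hx : p x
    · simp [hx, ih]
    · simp [hx]

lemma drop_takeWhile_len (p : Int → Bool) :
    ∀ l : List Int, l.drop ((l.takeWhile p).length) = l.dropWhile p := by
  intro l
  induction l with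
  | nil => rfl
  | cons x t ih =>
    by_cases hx : p x
    · simp [hx, ih]
    · simp [hx]

-- the bridge: on an ascending hall, the binary-search insertion is the structural insertion
lemma insort_eq_insertAsc {hall : List Int} (s : Int)
    (hp : hall.Pairwise (fun a b => a ≤ b)) :
    insort hall s = insertAsc s hall := by
  have hP : insortPos hall s hall.length 0 hall.length
      = (hall.takeWhile (fun y => decide (y < s))).length :=
    insortPos_eq s hall hp hall.length 0 hall.length (by omega) (by omega)
      ((List.takeWhile_sublist _).length_le) (le_refl _)
  rw [insort]
  simp only [hP]
  rw [take_takeWhile_len, drop_takeWhile_len, insertAsc_eq_takeWhile]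

-- A's stable descending sort of (r ++ [s]) for r already descending is insertBy's insertion
-- of s before the first element < s; abbreviation for readability of the lemmas.
def insD (s : Int) (r : List Int) : List Int :=
  PySem.List.insertBy (fun a b => decide (b < a)) s r

lemma insD_length (s : Int) (r : List Int) : (insD s r).length = r.length + 1 := by
  induction r with
  | nil => rfl
  | cons x t ih =>
    simp only [insD, PySem.List.insertBy] at *
    split <;> simp_all

lemma insD_ne_nil (s : Int) (r : List Int) : insD s r ≠ [] := by
  intro h
  have := insD_length s r
  simp [h] at this

lemma mem_insD {y s : Int} {r : List Int} (h : y ∈ insD s r) : y = s ∨ y ∈ r :=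
  (PySem.List.mem_insertBy _ _ _ _).1 h

lemma insD_pairwise {s : Int} {r : List Int}
    (h : r.Pairwise (fun a b => b ≤ a)) : (insD s r).Pairwise (fun a b => b ≤ a) := by
  induction r with
  | nil => simp [insD, PySem.List.insertBy]
  | cons x t ih =>
    rcases List.pairwise_cons.1 h with ⟨hx, ht⟩
    simp only [insD, PySem.List.insertBy]
    split
    · rename_i hlt
      refine List.pairwise_cons.2 ⟨?_, h⟩
      intro y hy
      rcases List.mem_cons.1 hy with rfl | hy
      · exact le_of_lt (by simpa using hlt)
      · exact le_trans (hx _ hy) (le_of_lt (by simpa using hlt))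
    · rename_i hge
      refine List.pairwise_cons.2 ⟨?_, ih ht⟩
      intro y hy
      rcases mem_insD hy with rfl | hy
      · simpa using hge
      · exact hx _ hy

lemma insD_of_forall_le {s : Int} {r : List Int}
    (h : ∀ y ∈ r, s ≤ y) : insD s r = r ++ [s] := by
  refine PySem.List.insertBy_of_forall_not_before _ _ _ ?_
  intro y hy
  simpa using h y hy

lemma insertAsc_of_forall_lt {s : Int} {ys : List Int}
    (h : ∀ y ∈ ys, y < s) : insertAsc s ys = ys ++ [s] := by
  induction ys with
  | nil => rfl
  | cons x t ih =>
    simp only [insertAsc, if_pos (h x (by simp))]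
    simp [ih (fun y hy => h y (by simp [hy]))]

lemma insertAsc_append_of_le {s x : Int} (ys : List Int) (h : s ≤ x) :
    insertAsc s (ys ++ [x]) = insertAsc s ys ++ [x] := by
  induction ys with
  | nil => simp [insertAsc, not_lt_of_ge h]
  | cons y t ih =>
    simp only [List.cons_append, insertAsc]
    split <;> simp [ih]

lemma reverse_insD {s : Int} {r : List Int}
    (h : r.Pairwise (fun a b => b ≤ a)) :
    (insD s r).reverse = insertAsc s r.reverse := by
  induction r with
  | nil => rfl
  | cons x t ih =>
    rcases List.pairwise_cons.1 h with ⟨hx, ht⟩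
    simp only [insD, PySem.List.insertBy]
    split
    · rename_i hlt
      have hlt' : x < s := by simpa using hlt
      have : ∀ y ∈ (x :: t).reverse, y < s := by
        intro y hy
        rcases List.mem_cons.1 (List.mem_reverse.1 hy) with rfl | hy
        · exact hlt'
        · exact lt_of_le_of_lt (hx _ hy) hlt'
      rw [insertAsc_of_forall_lt this]
      simp
    · rename_i hge
      have hge' : s ≤ x := by simpa using hge
      have ht' := ih ht
      simp only [insD] at ht'
      simp only [List.reverse_cons, insertAsc_append_of_le _ hge', ht']

lemma insD_dropLast {s x : Int} (ys : List Int) (h : x < s) :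
    (insD s (ys ++ [x])).dropLast = insD s ys := by
  induction ys with
  | nil => simp [insD, PySem.List.insertBy, h]
  | cons y t ih =>
    simp only [List.cons_append, insD, PySem.List.insertBy] at *
    split
    · rw [List.dropLast_cons_of_ne_nil (by simp), List.dropLast_cons_of_ne_nil (by simp)]
      simp
    · rw [List.dropLast_cons_of_ne_nil (by
        intro hn
        exact insD_ne_nil s (t ++ [x]) (by simpa [insD] using hn))]
      rw [ih]

lemma desc_rev_head_mem {r : List Int} (h : r ≠ []) : r.reverse.headD 0 ∈ r := by
  cases hr : r.reverse with
  | nil => simp_all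
  | cons a l =>
    have ha : a ∈ r := List.mem_reverse.1 (by rw [hr]; exact List.mem_cons_self ..)
    simpa using ha

lemma desc_rev_head_min {r : List Int}
    (h : r.Pairwise (fun a b => b ≤ a)) : ∀ y ∈ r, r.reverse.headD 0 ≤ y := by
  have hrev : r.reverse.Pairwise (fun a b => a ≤ b) := by
    rw [List.pairwise_reverse]; exact h
  intro y hy
  cases hr : r.reverse with
  | nil => simp_all
  | cons a l =>
    have hy' : y ∈ a :: l := by rw [← hr]; exact List.mem_reverse.2 hy
    rw [hr] at hrev
    rcases List.mem_cons.1 hy' with rfl | hy'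
    · simp
    · simpa using List.rel_of_pairwise_cons hrev hy'

lemma min_eq_rev_head {r : List Int}
    (hp : r.Pairwise (fun a b => b ≤ a)) (hne : r ≠ []) :
    (PySem.List.min? r (fun x => x)).getD 0 = r.reverse.headD 0 := by
  cases hm : PySem.List.min? r (fun x => x) with
  | none => exact absurd ((PySem.List.min?_eq_none_iff r _).1 hm) hne
  | some m =>
    have hmem : m ∈ r := PySem.List.min?_mem hm
    have hmin : ∀ y ∈ r, m ≤ y := by
      intro y hy; simpa using PySem.List.min?_isMin hm y hy
    simp only [Option.getD_some]
    exact le_antisymm (hmin _ (desc_rev_head_mem hne)) (desc_rev_head_min hp m hmem)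

-- the per-step characterisation of A's ranking update, for a descending ranking
lemma sortedA_eq_insD {s : Int} {r : List Int}
    (h : r.Pairwise (fun a b => b ≤ a)) :
    PySem.List.sorted (r ++ [s]) (fun x => x) true = insD s r := by
  rw [PySem.List.sorted_rev_eq_foldl_insertBy, List.foldl_append]
  rw [← PySem.List.sorted_rev_eq_foldl_insertBy, PySem.List.sorted_rev_eq_self_of_pairwise _ _ h]
  rfl

-- the loop invariant: A's ranking is B's hall reversed, descending, at most k long;
-- then the remaining iterations append the same elements.
lemma fold_eq (k : Int) (hk : 1 ≤ k) :
    ∀ (score r h w : List Int), h = r.reverse →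
      r.Pairwise (fun a b => b ≤ a) → r.length ≤ k.toNat →
      (score.foldl (stepA k) (r, w)).2 = (score.foldl (stepB k) (h, w)).2 := by
  intro score
  induction score with
  | nil => intro r h w hh hp hl; simp
  | cons s rest ih =>
    intro r h w hh hp hl
    have hk' : (k.toNat : Int) = k := Int.toNat_of_nonneg (by omega)
    -- A's new ranking
    have hA : (stepA k (r, w) s).1 = List.take k.toNat (insD s r) := by
      simp only [stepA, sortedA_eq_insD hp]
      rw [PySem.List.slice_to _ (by omega)]
    by_cases hlt : r.length < k.toNat
    · -- room left: both insert
      have hr' : (stepA k (r, w) s).1 = insD s r := by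
        rw [hA, List.take_of_length_le (by rw [insD_length]; omega)]
      have hasc : h.Pairwise (fun a b => a ≤ b) := by
        rw [hh, List.pairwise_reverse]; exact hp
      have hB : (stepB k (h, w) s).1 = insertAsc s h := by
        simp only [stepB]
        rw [if_pos (by subst hh; simp only [List.length_reverse]; omega),
          insort_eq_insertAsc s hasc]
      have hkey : (insD s r).reverse = insertAsc s h := by
        rw [hh]; exact reverse_insD hp
      simp only [List.foldl_cons]
      have hout : (stepA k (r, w) s).2 = (stepB k (h, w) s).2 := by
        rw [show (stepA k (r, w) s).2
              = w ++ [(PySem.List.min? (stepA k (r, w) s).1 (fun x => x)).getD 0] from rfl,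
          show (stepB k (h, w) s).2 = w ++ [(stepB k (h, w) s).1.headD 0] from rfl,
          hr', hB, min_eq_rev_head (insD_pairwise hp) (insD_ne_nil s r), hkey]
      calc (List.foldl (stepA k) (stepA k (r, w) s) rest).2
          = (List.foldl (stepA k) ((stepA k (r, w) s).1, (stepA k (r, w) s).2) rest).2 := by rfl
        _ = (List.foldl (stepB k) ((stepB k (h, w) s).1, (stepB k (h, w) s).2) rest).2 := by
              rw [hr', hout, hB]
              exact ih _ _ _ hkey.symm (insD_pairwise hp) (by rw [insD_length]; omega)
        _ = (List.foldl (stepB k) (stepB k (h, w) s) rest).2 := by rfl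
    · -- hall full: replace the minimum or skip
      have heq : r.length = k.toNat := by omega
      have hrne : r ≠ [] := by
        intro hn; rw [hn] at heq; simp at heq; omega
      obtain ⟨ys, x, rfl⟩ := List.eq_nil_or_concat r |>.resolve_left hrne
      simp only [List.concat_eq_append] at hh hp hl hA hlt heq ⊢
      have hlen : ys.length + 1 = k.toNat := by simpa using heq
      have hhead : h.headD 0 = x := by rw [hh]; simp
      have hBfull : ¬ ((h.length : Int) < k) := by
        rw [hh]; simp only [List.length_reverse]; omega
      have hpys : ys.Pairwise (fun a b => b ≤ a) :=
        List.Pairwise.sublist (by simp) hp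
      by_cases hxs : x < s
      · -- replace the current minimum
        have hr' : (stepA k ((ys ++ [x]), w) s).1 = insD s ys := by
          rw [hA, ← heq]
          rw [show (ys ++ [x]).length = (insD s (ys ++ [x])).length - 1 by
            rw [insD_length]; omega]
          rw [← List.dropLast_eq_take, insD_dropLast ys hxs]
        have hkey : (insD s ys).reverse = insertAsc s h.tail := by
          rw [hh]; simp only [List.reverse_append, List.reverse_cons, List.reverse_nil,
            List.nil_append, List.singleton_append, List.tail_cons]
          exact reverse_insD hpys
        have hasc : h.tail.Pairwise (fun a b => a ≤ b) := by
          refine List.Pairwise.sublist (List.tail_sublist h) ?_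
          rw [hh, List.pairwise_reverse]; exact hp
        have hB : (stepB k (h, w) s).1 = insertAsc s h.tail := by
          simp only [stepB]
          rw [if_neg hBfull, if_pos (by rw [hhead]; exact hxs),
            insort_eq_insertAsc s hasc]
        simp only [List.foldl_cons]
        have hpr' : (insD s ys).Pairwise (fun a b => b ≤ a) := insD_pairwise hpys
        have hout : (stepA k ((ys ++ [x]), w) s).2 = (stepB k (h, w) s).2 := by
          rw [show (stepA k ((ys ++ [x]), w) s).2
                = w ++ [(PySem.List.min? (stepA k ((ys ++ [x]), w) s).1 (fun x => x)).getD 0] from rfl,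
            show (stepB k (h, w) s).2 = w ++ [(stepB k (h, w) s).1.headD 0] from rfl,
            hr', hB, min_eq_rev_head hpr' (insD_ne_nil s ys), hkey]
        calc (List.foldl (stepA k) (stepA k ((ys ++ [x]), w) s) rest).2
            = (List.foldl (stepA k) ((stepA k ((ys ++ [x]), w) s).1, (stepA k ((ys ++ [x]), w) s).2) rest).2 := by rfl
          _ = (List.foldl (stepB k) ((stepB k (h, w) s).1, (stepB k (h, w) s).2) rest).2 := by
                rw [hr', hout, hB]
                refine ih _ _ _ hkey.symm hpr' ?_
                rw [insD_length]
                omega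
          _ = (List.foldl (stepB k) (stepB k (h, w) s) rest).2 := by rfl
      · -- s too small: nothing changes
        have hsle : ∀ y ∈ ys ++ [x], s ≤ y := by
          have hxmin := desc_rev_head_min hp
          have hhx : (ys ++ [x]).reverse.headD 0 = x := by simp
          intro y hy
          have := hxmin y hy
          rw [hhx] at this
          omega
        have hr' : (stepA k ((ys ++ [x]), w) s).1 = ys ++ [x] := by
          rw [hA, insD_of_forall_le hsle, ← heq, List.take_left]
        have hB : (stepB k (h, w) s).1 = h := by
          simp only [stepB]
          rw [if_neg hBfull, if_neg (by rw [hhead]; omega)]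
        have hout : (stepA k ((ys ++ [x]), w) s).2 = (stepB k (h, w) s).2 := by
          have h1 : (stepA k ((ys ++ [x]), w) s).2
              = w ++ [(PySem.List.min? (ys ++ [x]) (fun x => x)).getD 0] := by
            simp only [stepA]
            have := hr'
            simp only [stepA] at this
            rw [this]
          rw [h1, min_eq_rev_head hp (by simp), ← hh]
          simp only [stepB]
          rw [if_neg hBfull, if_neg (by rw [hhead]; omega)]
        simp only [List.foldl_cons]
        calc (List.foldl (stepA k) (stepA k ((ys ++ [x]), w) s) rest).2
            = (List.foldl (stepA k) ((stepA k ((ys ++ [x]), w) s).1, (stepA k ((ys ++ [x]), w) s).2) rest).2 := by rfl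
          _ = (List.foldl (stepB k) ((stepB k (h, w) s).1, (stepB k (h, w) s).2) rest).2 := by
                rw [hr', hout, hB]
                exact ih _ _ _ hh hp hl
          _ = (List.foldl (stepB k) (stepB k (h, w) s) rest).2 := by rfl

-- ===== VERDICT (by name: the statement is the Claim_ definition above) =====
theorem solution_spec : Claim_equal_solution := by
  intro k score _ hpre
  unfold Spec_solution solution solution_alt
  rcases hpre with rfl | hk
  · rfl
  · exact fold_eq k hk score [] [] [] rfl (by simp) (by simp)
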